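-- pv_equiv track=rewrite | github.com/RyanZaph/comp110-26s-workspace | lessons/data_analysis.py/utils.py | data_filter
-- ===== SOURCE A (Python) =====
-- def data_filter(concat_dict: dict[str, list[str]]) -> dict[str, list[str]]:
--     result: dict[str, list[str]] = {}
--     keep_indices: list[int] = []
--
--     for element in range(len(concat_dict["interested_connections"])):
--         if int(concat_dict["interested_connections"][element]) <= 3:
--             keep_indices.append(element)
--
--     for column in concat_dict:
--         result[column] = []
--         for element in keep_indices:
--             result[column].append(concat_dict[column][element])
--
--     return result
-- ===== SOURCE B (Python) =====
-- def data_filter(concat_dict: dict[str, list[str]]) -> dict[str, list[str]]: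
--     cols = list(concat_dict)
--     # Transpose: extract each kept row as a record, then transpose the kept
--     # rows back into columns.
--     rows = [[concat_dict[c][i] for c in cols]
--             for i, v in enumerate(concat_dict["interested_connections"])
--             if int(v) <= 3]
--     return {c: [row[j] for row in rows] for j, c in enumerate(cols)}
-- ===== Notes on version B (the rewrite author's own statement) =====
-- stated objective: alternative
-- what changed: Instead of precomputing a shared keep_indices table and rebuilding each column by indexed appends, B transposes the table: it materialises each kept row as a record in one pass over enumerate(interested_connections), then transposes the row records back into columns by position.
import Mathlib
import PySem

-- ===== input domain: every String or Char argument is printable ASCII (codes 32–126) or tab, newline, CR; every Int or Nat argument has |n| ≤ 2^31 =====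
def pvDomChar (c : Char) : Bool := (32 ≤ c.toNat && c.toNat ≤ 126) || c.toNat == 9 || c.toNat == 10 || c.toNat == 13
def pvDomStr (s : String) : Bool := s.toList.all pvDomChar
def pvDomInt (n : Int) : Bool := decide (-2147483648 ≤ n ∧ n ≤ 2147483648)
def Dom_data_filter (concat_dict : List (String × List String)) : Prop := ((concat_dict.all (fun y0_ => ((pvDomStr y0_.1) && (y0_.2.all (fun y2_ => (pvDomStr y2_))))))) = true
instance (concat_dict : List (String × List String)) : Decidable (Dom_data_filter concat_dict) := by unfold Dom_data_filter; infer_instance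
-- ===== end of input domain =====

-- B replaces A's shared keep_indices table + per-column rebuild by a transposition:
-- it materialises each kept ROW as a record in one pass, then transposes the row
-- records back into columns (alternative decomposition; same cost).

-- ===== PORT A =====
def data_filter (concat_dict : List (String × List String)) : List (String × List String) :=
  let d := PySem.Dict.mk concat_dict
  let ic := (d.get? "interested_connections").getD []
  let keep : List Int :=
    (PySem.List.pyRange 0 (ic.length : Int) 1).foldl
      (fun ks e =>
        if (PySem.Int.ofStr? (PySem.List.pyGetD ic e "")).getD 4 ≤ 3 then ks ++ [e] else ks) []
  (concat_dict.foldl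
    (fun res p =>
      res.insert p.1
        (keep.foldl (fun col e => col ++ [PySem.List.pyGetD ((d.get? p.1).getD []) e ""]) []))
    PySem.Dict.empty).items

-- ===== PORT B =====
def data_filter_alt (concat_dict : List (String × List String)) : List (String × List String) :=
  let d := PySem.Dict.mk concat_dict
  let cols := d.keys
  let interested := (d.get? "interested_connections").getD []
  let rows : List (List String) :=
    ((PySem.List.enumerate interested).filter
        (fun iv => (PySem.Int.ofStr? iv.2).getD 4 ≤ 3)).map
      (fun iv => cols.map (fun c => PySem.List.pyGetD ((d.get? c).getD []) iv.1 ""))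
  ((PySem.List.enumerate cols).foldl
    (fun r jc => r.insert jc.2 (rows.map (fun row => PySem.List.pyGetD row jc.1 "")))
    PySem.Dict.empty).items

-- ===== PRECONDITION & SPEC =====
-- Pre_ excludes exactly the inputs where the Python A raises: a missing
-- "interested_connections" key (KeyError), a non-int-parsable entry in it (ValueError),
-- and a column too short at some kept index (IndexError); the Nodup-keys conjunct only
-- rules out association lists with duplicate keys, which do not correspond to any
-- Python dict input.
def Pre_data_filter (concat_dict : List (String × List String)) : Prop :=
  (concat_dict.map Prod.fst).Nodup ∧
  ((PySem.Dict.mk concat_dict).get? "interested_connections").isSome = true ∧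
  (∀ s ∈ ((PySem.Dict.mk concat_dict).get? "interested_connections").getD [],
      (PySem.Int.ofStr? s).isSome = true) ∧
  (∀ p ∈ concat_dict,
      ∀ i : Fin (((PySem.Dict.mk concat_dict).get? "interested_connections").getD []).length,
        (PySem.Int.ofStr? (((PySem.Dict.mk concat_dict).get? "interested_connections").getD [])[i]).getD 4 ≤ 3 →
          i.1 < p.2.length)
instance (concat_dict : List (String × List String)) : Decidable (Pre_data_filter concat_dict) := by
  unfold Pre_data_filter; infer_instance

def pvWitness_data_filter : (List (String × List String)) :=
  [("interested_connections", ["2", "5"]), ("name", ["ann", "bob"])]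

def Spec_data_filter (concat_dict : List (String × List String)) (out : List (String × List String)) : Prop := out = data_filter_alt concat_dict
instance (concat_dict : List (String × List String)) (out : List (String × List String)) : Decidable (Spec_data_filter concat_dict out) := by unfold Spec_data_filter; infer_instance

-- ===== CLAIM =====
def Claim_equal_data_filter : Prop := ∀ (concat_dict : List (String × List String)), Dom_data_filter concat_dict → Pre_data_filter concat_dict → Spec_data_filter concat_dict (data_filter concat_dict)

-- ===== LEMMAS AND PROOFS =====

-- A reduces to the common normal form: one map over the input pairs.
theorem a_norm (cd : List (String × List String))
    (h1 : (cd.map Prod.fst).Nodup) :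
    data_filter cd =
      cd.map (fun p =>
        (p.1,
          ((PySem.List.pyRange 0 ((((PySem.Dict.mk cd).get? "interested_connections").getD []).length : Int) 1).filter
              (fun j => (PySem.Int.ofStr? (PySem.List.pyGetD (((PySem.Dict.mk cd).get? "interested_connections").getD []) j "")).getD 4 ≤ 3)).map
            (fun i => PySem.List.pyGetD (((PySem.Dict.mk cd).get? p.1).getD []) i ""))) := by
  unfold data_filter
  simp only [PySem.List.foldl_append_ite_eq_filter, PySem.List.foldl_append_singleton_eq_map,
    List.nil_append]
  rw [PySem.Dict.items_foldl_insert_fresh]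
  · simp [PySem.Dict.empty]
  · intro a _; simp [PySem.Dict.contains_empty]
  · simpa using h1

-- B reduces to the same normal form.
theorem b_norm (cd : List (String × List String))
    (h1 : (cd.map Prod.fst).Nodup) :
    data_filter_alt cd =
      cd.map (fun p =>
        (p.1,
          ((PySem.List.pyRange 0 ((((PySem.Dict.mk cd).get? "interested_connections").getD []).length : Int) 1).filter
              (fun j => (PySem.Int.ofStr? (PySem.List.pyGetD (((PySem.Dict.mk cd).get? "interested_connections").getD []) j "")).getD 4 ≤ 3)).map
            (fun i => PySem.List.pyGetD (((PySem.Dict.mk cd).get? p.1).getD []) i ""))) := by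
  unfold data_filter_alt
  dsimp only
  have H := PySem.Dict.items_foldl_insert_fresh
      (PySem.List.enumerate (PySem.Dict.mk cd).keys) Prod.snd
      (fun jc => List.map (fun row => PySem.List.pyGetD row jc.1 "")
        (List.map
          (fun iv => List.map (fun c => PySem.List.pyGetD (((PySem.Dict.mk cd).get? c).getD []) iv.1 "")
            (PySem.Dict.mk cd).keys)
          (List.filter (fun iv => decide ((PySem.Int.ofStr? iv.2).getD 4 ≤ 3))
            (PySem.List.enumerate (((PySem.Dict.mk cd).get? "interested_connections").getD [])))))
      PySem.Dict.empty
      (by intro a _; simp [PySem.Dict.contains_empty])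
      (by rw [PySem.List.map_snd_enumerate]; simpa [PySem.Dict.keys_mk] using h1)
  rw [H]
  rw [PySem.List.enumerate_eq_map_pyRange (((PySem.Dict.mk cd).get? "interested_connections").getD []) ""]
  simp only [List.filter_map, List.map_map, PySem.Dict.empty, List.nil_append, Function.comp_def]
  apply List.ext_getElem
  · simp [PySem.Dict.keys_mk]
  · intro k hk hk'
    simp only [List.getElem_map, PySem.List.getElem_enumerate, PySem.Dict.keys_mk, Prod.mk.injEq]
    constructor
    · simp
    · simp only [PySem.List.len]
      apply List.map_congr_left
      intro i hi
      simp only [zero_add, PySem.List.pyGetD_natCast]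
      rw [List.getD_eq_getElem _ _ (by simpa using hk)]
      simp

-- ===== VERDICT =====
theorem data_filter_spec : Claim_equal_data_filter := by
  intro cd _ hpre
  unfold Spec_data_filter
  rw [a_norm cd hpre.1, b_norm cd hpre.1]
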